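-- pv_equiv track=rewrite | github.com/BeautterLife/Algorithms | 프로그래머스/체육복.py | solution
-- ===== SOURCE A (Python) =====
-- def solution(n, lost, reserve):
--     answer = 0
--     reserve_set = set(reserve) - set(lost)
--     lost = list(set(lost) - set(reserve))
--
--     for i in sorted(lost):
--         if i-1 in reserve_set:
--             answer+=1
--             reserve_set.remove(i-1)
--         elif i+1 in reserve_set:
--             reserve_set.remove(i+1)
--             answer+=1
--         elif not reserve_set:
--             break
--
--     return answer + n - len(lost)
-- ===== SOURCE B (Python) =====
-- def solution(n, lost, reserve):
--     lost_s = sorted(set(lost) - set(reserve))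
--     res_s = sorted(set(reserve) - set(lost))
--     i = j = 0
--     matched = 0
--     while i < len(lost_s) and j < len(res_s):
--         if res_s[j] < lost_s[i] - 1:
--             j += 1
--         elif res_s[j] <= lost_s[i] + 1:
--             matched += 1
--             i += 1
--             j += 1
--         else:
--             i += 1
--     return n - len(lost_s) + matched
-- ===== Notes on version B (the rewrite author's own statement) =====
-- stated objective: alternative
-- what changed: Replaces the set-membership greedy (sorted lost scanned while mutating a reserve set with remove) by the classic two-pointer merge over the two sorted deduplicated lists, with no set mutation inside the loop.
import Mathlib
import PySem

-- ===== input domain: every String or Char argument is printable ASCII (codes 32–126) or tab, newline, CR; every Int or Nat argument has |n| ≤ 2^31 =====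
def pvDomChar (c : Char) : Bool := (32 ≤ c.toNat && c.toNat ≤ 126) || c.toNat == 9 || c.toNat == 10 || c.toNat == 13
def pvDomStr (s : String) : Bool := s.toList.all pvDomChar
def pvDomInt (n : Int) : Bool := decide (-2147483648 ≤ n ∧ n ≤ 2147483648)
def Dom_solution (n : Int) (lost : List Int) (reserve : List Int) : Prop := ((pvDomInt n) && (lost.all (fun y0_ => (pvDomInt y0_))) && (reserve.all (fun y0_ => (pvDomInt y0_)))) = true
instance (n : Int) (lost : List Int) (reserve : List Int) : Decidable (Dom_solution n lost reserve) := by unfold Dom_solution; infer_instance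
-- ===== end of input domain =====

-- B replaces A's set-mutating greedy by a two-pointer merge of the two sorted deduplicated lists (alternative decomposition, same cost).

-- ===== PORT A =====
-- A's for-loop with its break, as structural recursion over sorted(lost);
-- reserve_set.remove(i∓1) is guarded by the membership test, so it equals Set.discard there (exact)
def solutionLoop (ls : List Int) (answer : Int) (s : PySem.Set Int) : Int :=
  match ls with
  | [] => answer
  | i :: rest =>
    if PySem.Set.contains s (i - 1) then
      solutionLoop rest (answer + 1) (PySem.Set.discard s (i - 1))
    else if PySem.Set.contains s (i + 1) then
      solutionLoop rest (answer + 1) (PySem.Set.discard s (i + 1))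
    else if s.isEmpty then answer       -- 'elif not reserve_set: break'
    else solutionLoop rest answer s

def solution (n : Int) (lost : List Int) (reserve : List Int) : Int :=
  let reserve_set : PySem.Set Int := PySem.Set.diff (PySem.Set.ofList reserve) (PySem.Set.ofList lost)
  let lost2 : PySem.Set Int := PySem.Set.diff (PySem.Set.ofList lost) (PySem.Set.ofList reserve)
  -- list(set…) is consumed only through sorted() and len(), both hash-order independent
  solutionLoop (PySem.List.sorted lost2 (fun x => x) false) 0 reserve_set + n - lost2.length

-- ===== PORT B =====
-- the while loop of Source B: advance over both sorted lists, 'matched' is the accumulator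
def tpLoop (ls rs : List Int) (matched : Int) : Int :=
  match ls, rs with
  | [], _ => matched
  | _ :: _, [] => matched
  | l :: ls', r :: rs' =>
    if r < l - 1 then tpLoop (l :: ls') rs' matched
    else if r ≤ l + 1 then tpLoop ls' rs' (matched + 1)
    else tpLoop ls' (r :: rs') matched
termination_by ls.length + rs.length

def solution_alt (n : Int) (lost : List Int) (reserve : List Int) : Int :=
  let lostS := PySem.List.sorted (PySem.Set.diff (PySem.Set.ofList lost) (PySem.Set.ofList reserve)) (fun x => x) false
  let resS := PySem.List.sorted (PySem.Set.diff (PySem.Set.ofList reserve) (PySem.Set.ofList lost)) (fun x => x) false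
  n - lostS.length + tpLoop lostS resS 0

-- ===== PRECONDITION & SPEC =====
def Spec_solution (n : Int) (lost : List Int) (reserve : List Int) (out : Int) : Prop := out = solution_alt n lost reserve
instance (n : Int) (lost : List Int) (reserve : List Int) (out : Int) : Decidable (Spec_solution n lost reserve out) := by unfold Spec_solution; infer_instance

-- ===== CLAIM (what is proved, stated in full; the proofs are below) =====
def Claim_equal_solution : Prop := ∀ (n : Int) (lost : List Int) (reserve : List Int), Dom_solution n lost reserve → Spec_solution n lost reserve (solution n lost reserve)

-- ===== LEMMAS AND PROOFS =====

theorem solutionLoop_acc (ls : List Int) : ∀ (a : Int) (s : PySem.Set Int),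
    solutionLoop ls a s = a + solutionLoop ls 0 s := by
  induction ls with
  | nil => intro a s; simp [solutionLoop]
  | cons l ls ih =>
    intro a s
    simp only [solutionLoop]
    split_ifs with h1 h2 h3
    · rw [ih, ih (0 + 1)]; ring
    · rw [ih, ih (0 + 1)]; ring
    · ring
    · rw [ih, ih 0]

theorem tpLoop_acc (ls : List Int) : ∀ (rs : List Int) (m : Int),
    tpLoop ls rs m = m + tpLoop ls rs 0 := by
  induction ls with
  | nil => intro rs m; simp [tpLoop]
  | cons l ls ih =>
    intro rs
    induction rs with
    | nil => intro m; simp [tpLoop]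
    | cons r rs ihr =>
      intro m
      rw [tpLoop, tpLoop]
      split_ifs with h1 h2
      · exact ihr m
      · rw [ih rs (m + 1), ih rs (0 + 1)]; ring
      · rw [ih (r :: rs) m]

theorem tp_nil_r (ls : List Int) : tpLoop ls [] 0 = 0 := by
  cases ls <;> simp [tpLoop]

theorem tp_prepend_smalls (ls : List Int) : ∀ (ps rs : List Int),
    (∀ p ∈ ps, ∀ l ∈ ls, p < l - 1) → tpLoop ls (ps ++ rs) 0 = tpLoop ls rs 0 := by
  intro ps
  induction ps with
  | nil => intro rs _; rfl
  | cons p ps ih =>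
    intro rs h
    cases ls with
    | nil => simp [tpLoop]
    | cons l ls' =>
      have hp : p < l - 1 := h p (List.mem_cons_self ..) l (List.mem_cons_self ..)
      rw [List.cons_append, tpLoop, if_pos hp]
      exact ih rs (fun q hq => h q (List.mem_cons_of_mem _ hq))

theorem tp_far (l : Int) (ls : List Int) (hls : ∀ l' ∈ ls, l < l') :
    ∀ (rs : List Int), (∀ r ∈ rs, r < l - 1 ∨ l + 1 < r) →
    tpLoop (l :: ls) rs 0 = tpLoop ls rs 0 := by
  intro rs
  induction rs with
  | nil => intro _; rw [tp_nil_r, tp_nil_r]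
  | cons r rs ih =>
    intro h
    rcases h r (List.mem_cons_self ..) with hr | hr
    · rw [tpLoop, if_pos hr, ih (fun q hq => h q (List.mem_cons_of_mem _ hq))]
      have : tpLoop ls (r :: rs) 0 = tpLoop ls ([r] ++ rs) 0 := rfl
      rw [this, tp_prepend_smalls ls [r] rs]
      intro p hp l' hl'
      have := hls l' hl'
      simp only [List.mem_singleton] at hp
      omega
    · rw [tpLoop, if_neg (by omega), if_neg (by omega)]

theorem loop_eq_tp (L : List Int) : ∀ (S : PySem.Set Int) (R : List Int),
    L.Pairwise (· < ·) → S.Nodup → R.Pairwise (· < ·) →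
    (∀ x, x ∈ R ↔ x ∈ S) → (∀ l ∈ L, l ∉ S) →
    solutionLoop L 0 S = tpLoop L R 0 := by
  induction L with
  | nil => intro S R _ _ _ _ _; cases R <;> simp [solutionLoop, tpLoop]
  | cons l ls ih =>
    intro S R hL hS hR hmem hdisj
    have hl : ∀ l' ∈ ls, l < l' := (List.pairwise_cons.mp hL).1
    have hL' : ls.Pairwise (· < ·) := (List.pairwise_cons.mp hL).2
    by_cases hm1 : (l - 1) ∈ S
    · -- take l-1
      obtain ⟨P, Q, hRe⟩ := List.append_of_mem ((hmem (l - 1)).mpr hm1)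
      subst hRe
      rw [List.pairwise_append] at hR
      obtain ⟨hP, hQ', hPQ⟩ := hR
      have hQ : Q.Pairwise (· < ·) := (List.pairwise_cons.mp hQ').2
      have hltQ : ∀ q ∈ Q, l - 1 < q := (List.pairwise_cons.mp hQ').1
      have hPlt : ∀ p ∈ P, p < l - 1 := fun p hp => hPQ p hp (l - 1) (List.mem_cons_self ..)
      rw [solutionLoop, if_pos ((PySem.Set.contains_iff _ _).mpr hm1), solutionLoop_acc]
      rw [tp_prepend_smalls (l :: ls) P ((l - 1) :: Q)
        (fun p hp l'' hl'' => by
          have hpl := hPlt p hp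
          rcases List.mem_cons.mp hl'' with h | h
          · omega
          · have := hl l'' h; omega)]
      rw [tpLoop, if_neg (by omega), if_pos (by omega), tpLoop_acc]
      have hIH : solutionLoop ls 0 (PySem.Set.discard S (l - 1)) = tpLoop ls (P ++ Q) 0 := by
        refine ih _ _ hL' (PySem.Set.nodup_discard _ _ hS) ?_ ?_ ?_
        · rw [List.pairwise_append]
          exact ⟨hP, hQ, fun p hp q hq => by have := hPlt p hp; have := hltQ q hq; omega⟩
        · intro x
          rw [PySem.Set.mem_discard, ← hmem x]
          constructor
          · intro hx
            rcases List.mem_append.mp hx with h | h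
            · exact ⟨List.mem_append.mpr (Or.inl h), by have := hPlt x h; omega⟩
            · exact ⟨List.mem_append.mpr (Or.inr (List.mem_cons_of_mem _ h)),
                by have := hltQ x h; omega⟩
          · rintro ⟨hx, hne⟩
            rcases List.mem_append.mp hx with h | h
            · exact List.mem_append.mpr (Or.inl h)
            · rcases List.mem_cons.mp h with h | h
              · exact absurd h hne
              · exact List.mem_append.mpr (Or.inr h)
        · intro l' hl'
          have := hdisj l' (List.mem_cons_of_mem _ hl')
          rw [PySem.Set.mem_discard]
          tauto
      rw [hIH, tp_prepend_smalls ls P Q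
        (fun p hp l' hl' => by have := hPlt p hp; have := hl l' hl'; omega)]
    · by_cases hm2 : (l + 1) ∈ S
      · -- take l+1
        obtain ⟨P, Q, hRe⟩ := List.append_of_mem ((hmem (l + 1)).mpr hm2)
        subst hRe
        rw [List.pairwise_append] at hR
        obtain ⟨hP, hQ', hPQ⟩ := hR
        have hQ : Q.Pairwise (· < ·) := (List.pairwise_cons.mp hQ').2
        have hltQ : ∀ q ∈ Q, l + 1 < q := (List.pairwise_cons.mp hQ').1
        have hPlt : ∀ p ∈ P, p < l - 1 := by
          intro p hp
          have hplt : p < l + 1 := hPQ p hp (l + 1) (List.mem_cons_self ..)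
          have hpS : p ∈ S := (hmem p).mp (List.mem_append.mpr (Or.inl hp))
          have hpne1 : p ≠ l - 1 := fun h => hm1 (h ▸ hpS)
          have hpnel : p ≠ l := fun h => hdisj l (List.mem_cons_self ..) (h ▸ hpS)
          omega
        rw [solutionLoop, if_neg (by simp [hm1]),
          if_pos ((PySem.Set.contains_iff _ _).mpr hm2), solutionLoop_acc]
        rw [tp_prepend_smalls (l :: ls) P ((l + 1) :: Q)
          (fun p hp l'' hl'' => by
            have hpl := hPlt p hp
            rcases List.mem_cons.mp hl'' with h | h
            · omega
            · have := hl l'' h; omega)]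
        rw [tpLoop, if_neg (by omega), if_pos (by omega), tpLoop_acc]
        have hIH : solutionLoop ls 0 (PySem.Set.discard S (l + 1)) = tpLoop ls (P ++ Q) 0 := by
          refine ih _ _ hL' (PySem.Set.nodup_discard _ _ hS) ?_ ?_ ?_
          · rw [List.pairwise_append]
            exact ⟨hP, hQ, fun p hp q hq => by have := hPlt p hp; have := hltQ q hq; omega⟩
          · intro x
            rw [PySem.Set.mem_discard, ← hmem x]
            constructor
            · intro hx
              rcases List.mem_append.mp hx with h | h
              · exact ⟨List.mem_append.mpr (Or.inl h), by have := hPlt x h; omega⟩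
              · exact ⟨List.mem_append.mpr (Or.inr (List.mem_cons_of_mem _ h)),
                  by have := hltQ x h; omega⟩
            · rintro ⟨hx, hne⟩
              rcases List.mem_append.mp hx with h | h
              · exact List.mem_append.mpr (Or.inl h)
              · rcases List.mem_cons.mp h with h | h
                · exact absurd h hne
                · exact List.mem_append.mpr (Or.inr h)
          · intro l' hl'
            have := hdisj l' (List.mem_cons_of_mem _ hl')
            rw [PySem.Set.mem_discard]
            tauto
        rw [hIH, tp_prepend_smalls ls P Q
          (fun p hp l' hl' => by have := hPlt p hp; have := hl l' hl'; omega)]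
      · -- no neighbour available
        have hfar : ∀ r ∈ R, r < l - 1 ∨ l + 1 < r := by
          intro r hr
          have hrS : r ∈ S := (hmem r).mp hr
          have h1 : r ≠ l - 1 := fun h => hm1 (h ▸ hrS)
          have h2 : r ≠ l + 1 := fun h => hm2 (h ▸ hrS)
          have h3 : r ≠ l := fun h => hdisj l (List.mem_cons_self ..) (h ▸ hrS)
          omega
        rw [solutionLoop, if_neg (by simp [hm1]),
          if_neg (by simp [hm2])]
        by_cases hse : S = []
        · subst hse
          have hRnil : R = [] := by
            rw [List.eq_nil_iff_forall_not_mem]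
            intro x hx
            exact absurd ((hmem x).mp hx) (List.not_mem_nil)
          subst hRnil
          simp [tpLoop]
        · rw [if_neg (by simpa [List.isEmpty_iff] using hse)]
          rw [ih S R hL' hS hR hmem
            (fun l' hl' => hdisj l' (List.mem_cons_of_mem _ hl')),
            tp_far l ls hl R hfar]

theorem sorted_strict (s : List Int) (h : s.Nodup) :
    (PySem.List.sorted s (fun x => x) false).Pairwise (· < ·) := by
  have h1 := PySem.List.sorted_pairwise s (fun x => x)
  have h2 : (PySem.List.sorted s (fun x => x) false).Nodup :=
    ((PySem.List.sorted_perm s (fun x => x) false).nodup_iff).mpr h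
  exact (h1.and h2).imp (fun hab => lt_of_le_of_ne hab.1 hab.2)

-- ===== VERDICT (by name: the statement is the Claim_ definition above) =====
theorem solution_spec : Claim_equal_solution := by
  unfold Claim_equal_solution
  intro n lost reserve _
  unfold Spec_solution solution solution_alt
  dsimp only
  set lost2 : PySem.Set Int := PySem.Set.diff (PySem.Set.ofList lost) (PySem.Set.ofList reserve) with hlost2
  set S : PySem.Set Int := PySem.Set.diff (PySem.Set.ofList reserve) (PySem.Set.ofList lost) with hSdef
  set L := PySem.List.sorted lost2 (fun x => x) false with hLdef
  set R := PySem.List.sorted S (fun x => x) false with hRdef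
  have hnodL : lost2.Nodup := PySem.Set.nodup_diff _ _ (PySem.Set.nodup_ofList lost)
  have hnodS : S.Nodup := PySem.Set.nodup_diff _ _ (PySem.Set.nodup_ofList reserve)
  have hmain : solutionLoop L 0 S = tpLoop L R 0 := by
    refine loop_eq_tp L S R (sorted_strict _ hnodL) hnodS (sorted_strict _ hnodS) ?_ ?_
    · intro x; exact PySem.List.mem_sorted S (fun x => x) false x
    · intro l hl
      have hl2 : l ∈ lost2 := (PySem.List.mem_sorted _ _ _ l).mp hl
      have := (PySem.Set.mem_diff _ _ l).mp hl2
      rw [PySem.Set.mem_diff]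
      tauto
  have hlen : L.length = lost2.length := PySem.List.length_sorted _ _ _
  rw [hmain, hlen]
  ring
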